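-- pv_equiv track=rewrite | github.com/burnsco/poker | training/aggregate_cfr.py | holdem_pair_rank
-- ===== SOURCE A (Python) =====
-- _RANK_ORDER = "23456789TJQKA"
--
-- def holdem_card_rank(card_str: str) -> int:
--     """Return numeric rank for a card string like '2d', '4c', 'Kh'."""
--     return _RANK_ORDER.index(card_str[0])
--
-- def holdem_pair_rank(cards: list[str]) -> int | None:
--     """Return rank of pair if cards contain a pair, else None."""
--     ranks = [holdem_card_rank(c) for c in cards]
--     seen: dict[int, int] = {}
--     for r in ranks:
--         seen[r] = seen.get(r, 0) + 1
--     for r, cnt in seen.items():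
--         if cnt >= 2:
--             return r
--     return None
-- ===== SOURCE B (Python) =====
-- _RANK_ORDER = "23456789TJQKA"
--
-- def holdem_card_rank(card_str: str) -> int:
--     """Return numeric rank for a card string like '2d', '4c', 'Kh'."""
--     return _RANK_ORDER.index(card_str[0])
--
-- def holdem_pair_rank(cards: list[str]) -> int | None:
--     """Return rank of pair if cards contain a pair, else None."""
--     ranks = [holdem_card_rank(c) for c in cards]
--     for i, r in enumerate(ranks):
--         if r in ranks[i + 1:]:
--             return r
--     return None
-- ===== Notes on version B (the rewrite author's own statement) =====
-- stated objective: simpler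
-- what changed: Replaced the two-phase count-dictionary construction and re-iteration by a direct nested forward scan: return the first rank that reappears in the remaining suffix.
import Mathlib
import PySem

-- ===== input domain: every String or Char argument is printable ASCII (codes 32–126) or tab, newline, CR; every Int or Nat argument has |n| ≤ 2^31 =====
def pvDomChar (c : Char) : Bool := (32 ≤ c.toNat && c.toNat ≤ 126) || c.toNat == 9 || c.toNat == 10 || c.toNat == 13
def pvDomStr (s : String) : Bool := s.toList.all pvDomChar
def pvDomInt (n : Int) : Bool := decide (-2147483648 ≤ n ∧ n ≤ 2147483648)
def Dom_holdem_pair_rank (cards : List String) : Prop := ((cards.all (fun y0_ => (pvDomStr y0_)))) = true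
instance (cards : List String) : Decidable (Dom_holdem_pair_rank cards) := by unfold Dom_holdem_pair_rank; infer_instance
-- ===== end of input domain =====

-- B replaces A's count-dictionary pass + re-iteration by a single nested forward scan
-- returning the first rank that reappears later (objective: simpler); same return value.


-- ===== PORT A =====
def pvRankOrder : String := "23456789TJQKA"

-- holdem_card_rank: _RANK_ORDER.index(card_str[0]).  card_str[0] raises IndexError on "" and
-- .index raises ValueError when absent (Str.find returns -1 there): both excluded by Pre_.
def pvCardRank (card_str : String) : Int :=
  match PySem.Str.pyGet? card_str 0 with
  | none => -1            -- Python raises IndexError here; outside Pre_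
  | some c => PySem.Str.find pvRankOrder (String.ofList [c])

-- 'for r, cnt in seen.items(): if cnt >= 2: return r' then 'return None'
def pvItemsScan : List (Int × Int) → Option Int
  | [] => none
  | (r, cnt) :: rest => if 2 ≤ cnt then some r else pvItemsScan rest

def holdem_pair_rank (cards : List String) : Option Int :=
  let ranks := cards.map pvCardRank
  let seen := ranks.foldl (fun d r => d.insert r (d.getD r 0 + 1)) PySem.Dict.empty
  pvItemsScan seen.items

-- ===== PORT B =====
-- 'for i, r in enumerate(ranks): if r in ranks[i+1:]: return r' then 'return None'
def pvSuffixScan : List Int → Option Int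
  | [] => none
  | r :: rest => if rest.contains r then some r else pvSuffixScan rest

def holdem_pair_rank_alt (cards : List String) : Option Int :=
  pvSuffixScan (cards.map pvCardRank)

-- ===== PRECONDITION & SPEC =====
-- Pre_ excludes exactly the inputs where the Python A (and B) raises: a card that is the
-- empty string (IndexError) or whose first character is not a rank character (ValueError).
def Pre_holdem_pair_rank (cards : List String) : Prop :=
  ∀ c ∈ cards, c.toList ≠ [] ∧ c.toList.headD 'x' ∈ "23456789TJQKA".toList
instance (cards : List String) : Decidable (Pre_holdem_pair_rank cards) := by
  unfold Pre_holdem_pair_rank; infer_instance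

def pvWitness_holdem_pair_rank : List String := ["2d", "Kh", "2c"]

def Spec_holdem_pair_rank (cards : List String) (out : Option Int) : Prop := out = holdem_pair_rank_alt cards
instance (cards : List String) (out : Option Int) : Decidable (Spec_holdem_pair_rank cards out) := by unfold Spec_holdem_pair_rank; infer_instance

-- ===== CLAIM (what is proved, stated in full; the proofs are below) =====
def Claim_equal_holdem_pair_rank : Prop := ∀ (cards : List String), Dom_holdem_pair_rank cards → Pre_holdem_pair_rank cards → Spec_holdem_pair_rank cards (holdem_pair_rank cards)

-- ===== LEMMAS AND PROOFS =====

-- A's items scan over (k, c k) pairs is a find? over the keys.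
theorem pvItemsScan_map (l : List Int) (c : Int → Int) :
    pvItemsScan (l.map (fun k => (k, c k))) = l.find? (fun k => 2 ≤ c k) := by
  induction l with
  | nil => rfl
  | cons x xs ih =>
      simp only [List.map_cons, pvItemsScan, List.find?_cons]
      by_cases h : 2 ≤ c x <;> simp [h, ih]

theorem find?_discard (s : PySem.Set Int) (x : Int) (p : Int → Bool) (hx : p x = false) :
    (PySem.Set.discard s x).find? p = s.find? p := by
  unfold PySem.Set.discard
  induction s with
  | nil => rfl
  | cons y ys ih =>
      by_cases hy : y = x
      · subst hy; simp [hx, ih]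
      · simp only [List.filter_cons]
        have : (!y == x) = true := by simp [hy]
        rw [this]
        simp only [List.find?_cons]
        cases hpy : p y <;> simp [hpy, ih]

theorem find?_ofList (l : List Int) (p : Int → Bool) :
    (PySem.Set.ofList l).find? p = l.find? p := by
  induction l with
  | nil => rfl
  | cons x xs ih =>
      rw [PySem.Set.ofList_cons]
      simp only [List.find?_cons]
      cases hx : p x with
      | true => rfl
      | false => rw [find?_discard _ _ _ hx, ih]

theorem find?_congr_mem (l : List Int) (p q : Int → Bool) (h : ∀ a ∈ l, p a = q a) :
    l.find? p = l.find? q := by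
  induction l with
  | nil => rfl
  | cons x xs ih =>
      simp only [List.find?_cons, h x (List.mem_cons_self)]
      cases q x with
      | true => rfl
      | false => exact ih (fun a ha => h a (List.mem_cons_of_mem _ ha))

-- B's suffix scan is a find? for "count >= 2" over the whole list.
theorem pvSuffixScan_eq_find? (l : List Int) :
    pvSuffixScan l = l.find? (fun k => 2 ≤ (l.count k : Int)) := by
  induction l with
  | nil => rfl
  | cons x xs ih =>
      by_cases hmem : x ∈ xs
      · simp [pvSuffixScan, hmem]
      · have h0 : xs.count x = 0 := List.count_eq_zero.mpr hmem
        have hd : decide (2 ≤ (((x :: xs).count x : Nat) : Int)) = false := by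
          rw [decide_eq_false_iff_not, List.count_cons_self, h0]; norm_num
        simp only [pvSuffixScan, List.find?_cons, hd]
        simp only [List.contains_eq_mem, hmem, decide_false, Bool.false_eq_true, if_false]
        rw [ih, find?_congr_mem]
        intro a ha
        have hne : a ≠ x := fun h => hmem (h ▸ ha)
        simp [List.count_cons]
        rw [if_neg (fun h => hne h.symm)]
        omega

theorem scan_eq (l : List Int) :
    pvItemsScan ((l.foldl (fun d r => d.insert r (d.getD r 0 + 1)) PySem.Dict.empty).items)
      = pvSuffixScan l := by
  rw [PySem.Dict.foldl_insert_getD_add_one_eq_counter, PySem.Dict.items_counter,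
      pvItemsScan_map, find?_ofList, pvSuffixScan_eq_find?]

-- ===== VERDICT (by name: the statement is the Claim_ definition above) =====
theorem holdem_pair_rank_spec : Claim_equal_holdem_pair_rank := by
  intro cards _ _
  unfold Spec_holdem_pair_rank holdem_pair_rank holdem_pair_rank_alt
  exact scan_eq (cards.map pvCardRank)
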